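-- pv_equiv track=rewrite | github.com/xiao-xian-ok/TingLan | core/ast_engine.py | _try_resolve_string_expr
-- ===== SOURCE A (Python) =====
-- from typing import List, Dict, Optional, Set, Tuple, Any, Union
--
-- def _try_resolve_string_expr(expr: str) -> Optional[str]:
--     """解析简单的字符串拼接，如 "_P"."OST" """
--     parts = []
--     current = ""
--     in_string = False
--     string_char = None
--
--     for ch in expr:
--         if not in_string:
--             if ch in '"\'':
--                 in_string = True
--                 string_char = ch
--             elif ch == '.':
--                 continue
--             elif ch in ' \t':
--                 continue
--         else:
--             if ch == string_char:
--                 parts.append(current)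
--                 current = ""
--                 in_string = False
--             else:
--                 current += ch
--
--     if parts:
--         return ''.join(parts)
--     return None
-- ===== SOURCE B (Python) =====
-- def _try_resolve_string_expr(expr):
--     """Resolve simple string-literal concatenation by jumping between quotes with find/slices."""
--     parts = []
--     rest = expr
--     while rest:
--         ch, rest = rest[0], rest[1:]
--         if ch in '"\'':
--             j = rest.find(ch)
--             if j == -1:
--                 break
--             parts.append(rest[:j])
--             rest = rest[j + 1:]
--     return ''.join(parts) if parts else None
-- ===== Notes on version B (the rewrite author's own statement) =====
-- stated objective: simpler
-- what changed: Replaces the character-by-character state machine (in_string/string_char/current accumulator) with quote-to-quote jumping: take the next quote, locate its matching partner with str.find, and slice the literal content out in one step.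
import Mathlib
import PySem

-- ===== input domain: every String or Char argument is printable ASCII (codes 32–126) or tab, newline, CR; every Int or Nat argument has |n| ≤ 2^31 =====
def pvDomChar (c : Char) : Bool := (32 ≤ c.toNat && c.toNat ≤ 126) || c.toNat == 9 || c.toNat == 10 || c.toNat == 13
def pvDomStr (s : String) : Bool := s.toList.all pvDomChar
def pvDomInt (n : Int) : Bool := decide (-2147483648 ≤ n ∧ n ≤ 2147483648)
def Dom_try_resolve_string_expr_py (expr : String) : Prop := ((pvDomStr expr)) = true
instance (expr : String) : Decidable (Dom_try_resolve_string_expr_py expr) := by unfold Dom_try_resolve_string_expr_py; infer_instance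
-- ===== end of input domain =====

-- B replaces A's per-character state machine by quote-to-quote jumping with find and slicing (objective: simpler).


-- ===== PORT A =====
-- A: state machine over the characters; parts collected as List (List Char), current accumulator, in_string flag, string_char.
def aRun : List Char → List (List Char) → List Char → Bool → Option Char → List (List Char)
  | [], parts, _, _, _ => parts
  | ch :: rest, parts, current, inString, sc =>
    if inString = false then
      if ch = '"' ∨ ch = '\'' then aRun rest parts current true (some ch)
      else if ch = '.' then aRun rest parts current false sc
      else if ch = ' ' ∨ ch = '	' then aRun rest parts current false sc
      else aRun rest parts current false sc
    else
      if some ch = sc then aRun rest (parts ++ [current]) [] false sc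
      else aRun rest parts (current ++ [ch]) inString sc

def try_resolve_string_expr_py (expr : String) : Option String :=
  let parts := aRun expr.toList [] [] false none
  if parts = [] then none else some (String.mk parts.flatten)

-- ===== PORT B =====
-- B helper: rest.find(q) + the two slices, as one scan returning (rest[:j], rest[j+1:]); none = find returned -1.
def findSplit (q : Char) : List Char → Option (List Char × List Char)
  | [] => none
  | c :: rest =>
    if c = q then some ([], rest)
    else (findSplit q rest).map (fun p => (c :: p.1, p.2))

theorem findSplit_length {q : Char} : ∀ {xs p s}, findSplit q xs = some (p, s) → s.length < xs.length := by
  intro xs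
  induction xs with
  | nil => intro p s h; simp [findSplit] at h
  | cons c rest ih =>
    intro p s h
    simp only [findSplit] at h
    split at h
    · simp only [Option.some.injEq, Prod.mk.injEq] at h
      rw [← h.2]; simp
    · cases hf : findSplit q rest with
      | none => rw [hf] at h; simp at h
      | some pr =>
        rw [hf] at h; simp at h
        have := ih (p := pr.1) (s := pr.2) (by rw [hf])
        simp [← h.2]; omega

def bRun : List Char → List (List Char)
  | [] => []
  | c :: rest =>
    if c = '"' ∨ c = '\'' then
      match hfs : findSplit c rest with
      | some (p, s) => p :: bRun s
      | none => []
    else bRun rest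
termination_by xs => xs.length
decreasing_by
  · exact Nat.lt_succ_of_lt (findSplit_length hfs)
  · simp

def try_resolve_string_expr_py_alt (expr : String) : Option String :=
  let parts := bRun expr.toList
  if parts = [] then none else some (String.mk parts.flatten)

-- ===== PRECONDITION & SPEC =====
def Spec_try_resolve_string_expr_py (expr : String) (out : Option String) : Prop := out = try_resolve_string_expr_py_alt expr
instance (expr : String) (out : Option String) : Decidable (Spec_try_resolve_string_expr_py expr out) := by unfold Spec_try_resolve_string_expr_py; infer_instance

-- ===== CLAIM (what is proved, stated in full; the proofs are below) =====
def Claim_equal_try_resolve_string_expr_py : Prop := ∀ (expr : String), Dom_try_resolve_string_expr_py expr → Spec_try_resolve_string_expr_py expr (try_resolve_string_expr_py expr)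

-- ===== LEMMAS AND PROOFS =====



-- in-string phase of A ≡ findSplit: scanning inside a literal opened by q
theorem aRun_inString (q : Char) : ∀ (xs : List Char) (parts : List (List Char)) (cur : List Char),
    aRun xs parts cur true (some q) =
      (match findSplit q xs with
       | some (p, s) => aRun s (parts ++ [cur ++ p]) [] false (some q)
       | none => parts) := by
  intro xs
  induction xs with
  | nil => intro parts cur; simp [aRun, findSplit]
  | cons c rest ih =>
    intro parts cur
    by_cases hc : c = q
    · subst hc; simp [aRun, findSplit]
    · have hne : (some c = some q) = False := by simp [hc]
      simp only [aRun, findSplit, if_neg hc, hne, if_false, Bool.true_eq_false]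
      rw [ih]
      cases hf : findSplit q rest with
      | none => simp
      | some pr => cases pr; simp

-- out-of-string phase of A ≡ bRun, with the already-collected parts prepended
theorem aRun_outString : ∀ (xs : List Char) (parts : List (List Char)) (sc : Option Char),
    aRun xs parts [] false sc = parts ++ bRun xs := by
  intro xs
  induction xs using bRun.induct with
  | case1 => intro parts sc; simp [aRun, bRun]
  | case2 c rest hq p s hf ih =>
    intro parts sc
    have step : aRun (c :: rest) parts [] false sc = aRun rest parts [] true (some c) := by
      simp only [aRun]; rw [if_pos trivial, if_pos hq]
    have stepB : bRun (c :: rest) = p :: bRun s := by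
      simp only [bRun]; rw [if_pos hq]
      split
      · rename_i p' s' h'
        rw [hf] at h'
        simp only [Option.some.injEq, Prod.mk.injEq] at h'
        rw [h'.1, h'.2]
      · rename_i h'
        rw [hf] at h'; cases h'
    rw [step, aRun_inString, hf, stepB]
    simp [ih]
  | case3 c rest hq hf =>
    intro parts sc
    have step : aRun (c :: rest) parts [] false sc = aRun rest parts [] true (some c) := by
      simp only [aRun]; rw [if_pos trivial, if_pos hq]
    have stepB : bRun (c :: rest) = [] := by
      simp only [bRun]; rw [if_pos hq]
      split
      · rename_i p' s' h'
        rw [hf] at h'; cases h'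
      · rfl
    rw [step, aRun_inString, hf, stepB]
    simp
  | case4 c rest hq ih =>
    intro parts sc
    have step : aRun (c :: rest) parts [] false sc = aRun rest parts [] false sc := by
      simp only [aRun]; rw [if_pos trivial, if_neg hq]
      split
      · rfl
      · split <;> rfl
    have stepB : bRun (c :: rest) = bRun rest := by
      simp only [bRun]; rw [if_neg hq]
    rw [step, stepB]
    exact ih parts sc

-- ===== VERDICT =====
theorem try_resolve_string_expr_py_spec : Claim_equal_try_resolve_string_expr_py := by
  intro expr _
  unfold Spec_try_resolve_string_expr_py try_resolve_string_expr_py try_resolve_string_expr_py_alt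
  rw [aRun_outString]
  simp
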